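-- pv_equiv track=rewrite | github.com/jonathat22/Data-Science-Project-Portfolio | protein_sequencing/prot_seq.py | makeAminoAcidLabels
-- ===== SOURCE A (Python) =====
-- def combineProteins(proteinList):
--     """
--     combineProteins - generates list of all the amino acids that
--     occur across all proteins, in order
--
--     Argument:
--         proteinList: list of proteins generated by synthesizeProteins
--
--     Returns:
--         combined_proteins: list of amino acids occuring in all proteins
--     """
--
--     combined_proteins = []
--     for i in range(len(proteinList)):
--         for aa in range(len(proteinList[i])):
--             combined_proteins.append(proteinList[i][aa])
--     return combined_proteins
--
-- def aminoAcidDictionary(aaList):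
--     """
--     aminoAcidDictionary - counts of each amino acid
--
--     Argument:
--         aaList: list of amino acids generated by combineProteins
--
--     Returns:
--         aa_dict: dictionary that maps each amino acid to a count of
--         how often it occurs
--     """
--
--     aa_dict = {}
--     for i in range(len(aaList)):
--         key = aaList[i]
--         if key not in aa_dict:
--             aa_dict[key] = aaList.count(key)
--     return aa_dict
--
-- def makeAminoAcidLabels(geneList):
--     """
--     makeAminoAcidLabels - reformats data for plotting
--
--     Argument:
--         geneList: list of genes
--
--     Returns:
--         xLabels: sorted list of all the amino acids found
--     """
--
--     total_aa = []
--     sorted_aa_lst = []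
--     comb_prot = []
--     for i in range(len(geneList)):
--         comb_prot.append(combineProteins(geneList[i]))
--     for j in range(len(comb_prot)):
--         for k in range(len(comb_prot[j])):
--             total_aa.append(comb_prot[j][k])
--     comb_aa_dict = aminoAcidDictionary(total_aa)
--     xLabels = list(comb_aa_dict.keys())
--     xLabels.sort() #sorted aa_list
--     return xLabels
-- ===== SOURCE B (Python) =====
-- def makeAminoAcidLabels(geneList):
--     flat = [aa for proteinList in geneList for protein in proteinList for aa in protein]
--     flat.sort()
--     labels = []
--     for aa in flat:
--         if not labels or labels[-1] != aa:
--             labels.append(aa)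
--     return labels
-- ===== Notes on version B (the rewrite author's own statement) =====
-- stated objective: faster
-- what changed: Replaces A's build-a-count-dictionary-then-sort-its-keys strategy with one flatten pass, a single sort, and a linear adjacent-dedup scan that emits an element only when it differs from the previously emitted one.
import Mathlib
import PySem

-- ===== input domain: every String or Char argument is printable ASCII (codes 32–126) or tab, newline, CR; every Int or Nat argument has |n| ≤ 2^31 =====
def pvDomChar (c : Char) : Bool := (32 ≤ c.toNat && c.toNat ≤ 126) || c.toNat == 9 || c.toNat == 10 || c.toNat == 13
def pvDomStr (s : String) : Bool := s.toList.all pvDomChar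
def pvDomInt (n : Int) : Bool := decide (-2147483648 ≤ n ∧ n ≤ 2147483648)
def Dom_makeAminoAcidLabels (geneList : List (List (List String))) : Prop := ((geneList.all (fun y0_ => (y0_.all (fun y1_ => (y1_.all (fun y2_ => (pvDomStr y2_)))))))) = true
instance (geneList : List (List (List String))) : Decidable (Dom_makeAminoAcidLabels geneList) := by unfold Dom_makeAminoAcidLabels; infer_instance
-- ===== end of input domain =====

-- B replaces A's count-dictionary-then-sort-the-keys strategy with flatten, sort once,
-- then a single adjacent-dedup scan (objective: faster — no per-key count pass).

-- ===== PORT A =====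
def combineProteins (proteinList : List (List String)) : List String :=
  proteinList.foldl (fun combined protein =>
    protein.foldl (fun acc aa => acc ++ [aa]) combined) []

def aminoAcidDictionary (aaList : List String) : PySem.Dict String Int :=
  aaList.foldl (fun d key =>
    if d.contains key then d else d.insert key (aaList.count key : Int)) PySem.Dict.empty

def makeAminoAcidLabels (geneList : List (List (List String))) : List String :=
  let comb_prot := geneList.foldl (fun acc g => acc ++ [combineProteins g]) []
  let total_aa := comb_prot.foldl (fun acc p => p.foldl (fun a x => a ++ [x]) acc) []
  let comb_aa_dict := aminoAcidDictionary total_aa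
  PySem.List.sorted comb_aa_dict.keys (fun x => x) false

-- ===== PORT B =====
def makeAminoAcidLabels_alt (geneList : List (List (List String))) : List String :=
  let flat := geneList.flatMap (fun proteinList => proteinList.flatMap (fun protein => protein))
  let sortedFlat := PySem.List.sorted flat (fun x => x) false
  sortedFlat.foldl (fun labels aa =>
    if labels = [] ∨ labels.getLast? ≠ some aa then labels ++ [aa] else labels) []

-- ===== PRECONDITION & SPEC =====
def Spec_makeAminoAcidLabels (geneList : List (List (List String))) (out : List String) : Prop := out = makeAminoAcidLabels_alt geneList
instance (geneList : List (List (List String))) (out : List String) : Decidable (Spec_makeAminoAcidLabels geneList out) := by unfold Spec_makeAminoAcidLabels; infer_instance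

-- ===== CLAIM (what is proved, stated in full; the proofs are below) =====
def Claim_equal_makeAminoAcidLabels : Prop := ∀ (geneList : List (List (List String))), Dom_makeAminoAcidLabels geneList → Spec_makeAminoAcidLabels geneList (makeAminoAcidLabels geneList)

-- ===== LEMMAS AND PROOFS =====

-- append-accumulator fold is acc ++ l
theorem foldl_app (l acc : List String) :
    l.foldl (fun a x => a ++ [x]) acc = acc ++ l := by
  induction l generalizing acc with
  | nil => simp
  | cons x xs ih => rw [List.foldl_cons, ih]; simp

theorem combineProteins_eq (p : List (List String)) :
    combineProteins p = p.flatten := by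
  unfold combineProteins
  suffices h : ∀ acc, p.foldl (fun combined protein =>
      protein.foldl (fun acc aa => acc ++ [aa]) combined) acc = acc ++ p.flatten by
    simpa using h []
  induction p with
  | nil => simp
  | cons x xs ih => intro acc; rw [List.foldl_cons, foldl_app, ih]; simp

-- A's total_aa is the flat list of all amino acids
theorem totalA_eq (geneList : List (List (List String))) :
    (geneList.foldl (fun acc g => acc ++ [combineProteins g]) []).foldl
      (fun acc p => p.foldl (fun a x => a ++ [x]) acc) []
    = geneList.flatMap (fun proteinList => proteinList.flatMap (fun protein => protein)) := by
  have h1 : geneList.foldl (fun acc g => acc ++ [combineProteins g]) []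
      = geneList.map combineProteins := by
    suffices h : ∀ acc, geneList.foldl (fun acc g => acc ++ [combineProteins g]) acc
        = acc ++ geneList.map combineProteins by simpa using h []
    induction geneList with
    | nil => simp
    | cons x xs ih => intro acc; rw [List.foldl_cons, ih]; simp
  rw [h1]
  have h2 : ∀ (cp : List (List String)) acc,
      cp.foldl (fun acc p => p.foldl (fun a x => a ++ [x]) acc) acc = acc ++ cp.flatten := by
    intro cp
    induction cp with
    | nil => simp
    | cons x xs ih => intro acc; rw [List.foldl_cons, foldl_app, ih]; simp
  rw [h2]
  have h3 : geneList.map combineProteins = geneList.map (fun g => g.flatten) :=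
    List.map_congr_left (fun g _ => combineProteins_eq g)
  rw [h3]
  simp [List.flatMap]

-- keys of A's conditional-insert loop: membership and nodup
theorem aaLoop_keys (l : List String) (d : PySem.Dict String Int) (cnt : String → Int)
    (hnd : d.keys.Nodup) :
    (∀ x, x ∈ (l.foldl (fun d key => if d.contains key then d else d.insert key (cnt key)) d).keys
        ↔ x ∈ d.keys ∨ x ∈ l)
    ∧ (l.foldl (fun d key => if d.contains key then d else d.insert key (cnt key)) d).keys.Nodup := by
  induction l generalizing d with
  | nil => simpa using hnd
  | cons a as ih =>
    simp only [List.foldl_cons]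
    by_cases hc : d.contains a
    · rw [if_pos hc]
      obtain ⟨hm, hn⟩ := ih d hnd
      refine ⟨fun x => ?_, hn⟩
      rw [hm x]
      have ha : a ∈ d.keys := (PySem.Dict.contains_iff_mem_keys d a).1 hc
      constructor
      · rintro (h | h)
        · exact Or.inl h
        · exact Or.inr (List.mem_cons_of_mem _ h)
      · rintro (h | h)
        · exact Or.inl h
        · rcases List.mem_cons.1 h with rfl | h
          · exact Or.inl ha
          · exact Or.inr h
    · rw [if_neg hc]
      have hnd' : (d.insert a (cnt a)).keys.Nodup := PySem.Dict.nodup_keys_insert d a (cnt a) hnd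
      obtain ⟨hm, hn⟩ := ih (d.insert a (cnt a)) hnd'
      refine ⟨fun x => ?_, hn⟩
      rw [hm x]
      rw [PySem.Dict.mem_keys_insert]
      constructor
      · rintro ((rfl | h) | h)
        · exact Or.inr (List.mem_cons_self ..)
        · exact Or.inl h
        · exact Or.inr (List.mem_cons_of_mem _ h)
      · rintro (h | h)
        · exact Or.inl (Or.inr h)
        · rcases List.mem_cons.1 h with rfl | h
          · exact Or.inl (Or.inl rfl)
          · exact Or.inr h

-- the tail scan of B's adjacent-dedup loop, with the previously emitted element explicit
def dd (prev : String) : List String → List String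
  | [] => []
  | x :: xs => if x = prev then dd prev xs else x :: dd x xs

-- B's foldl, once the accumulator is nonempty, is acc ++ dd (last acc)
theorem foldl_dedup_eq_dd (l : List String) (acc : List String) (p : String)
    (h : acc.getLast? = some p) :
    l.foldl (fun labels aa =>
      if labels = [] ∨ labels.getLast? ≠ some aa then labels ++ [aa] else labels) acc
    = acc ++ dd p l := by
  induction l generalizing acc p with
  | nil => simp [dd]
  | cons x xs ih =>
    have hne : acc ≠ [] := by intro hnil; rw [hnil] at h; simp at h
    simp only [List.foldl_cons]
    by_cases hx : x = p
    · subst hx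
      rw [if_neg (by simp [hne, h]), dd, if_pos rfl]
      exact ih acc x h
    · have hcond : acc = [] ∨ acc.getLast? ≠ some x :=
        Or.inr (by rw [h]; exact fun hh => hx (Option.some.inj hh).symm)
      rw [if_pos hcond]
      have hlast : (acc ++ [x]).getLast? = some x := by simp
      rw [ih (acc ++ [x]) x hlast, dd, if_neg hx]
      simp

-- dd on a sorted-nondecreasing tail: same members as prev :: tail, strictly increasing
theorem dd_spec (l : List String) (p : String) (hs : (p :: l).Pairwise (· ≤ ·)) :
    (∀ x, x ∈ p :: dd p l ↔ x ∈ p :: l) ∧ (p :: dd p l).Pairwise (· < ·) := by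
  induction l generalizing p with
  | nil => simp [dd]
  | cons x xs ih =>
    rw [dd]
    by_cases hx : x = p
    · subst hx
      have hs' : (x :: xs).Pairwise (· ≤ ·) := (List.pairwise_cons.1 hs).2
      obtain ⟨hm, hp⟩ := ih x hs'
      rw [if_pos rfl]
      refine ⟨fun y => ?_, hp⟩
      rw [hm y]
      simp
    · rw [if_neg hx]
      have hs' : (x :: xs).Pairwise (· ≤ ·) := (List.pairwise_cons.1 hs).2
      obtain ⟨hm, hp⟩ := ih x hs'
      have hpx : p < x :=
        lt_of_le_of_ne ((List.pairwise_cons.1 hs).1 x (List.mem_cons_self ..)) (Ne.symm hx)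
      constructor
      · intro y
        constructor
        · intro h
          rcases List.mem_cons.1 h with rfl | h
          · exact List.mem_cons_self ..
          · exact List.mem_cons_of_mem _ ((hm y).1 h)
        · intro h
          rcases List.mem_cons.1 h with rfl | h
          · exact List.mem_cons_self ..
          · exact List.mem_cons_of_mem _ ((hm y).2 h)
      · rw [List.pairwise_cons]
        refine ⟨fun y hy => ?_, hp⟩
        rcases List.mem_cons.1 hy with rfl | hy
        · exact hpx
        · exact lt_trans hpx ((List.pairwise_cons.1 hp).1 y hy)

-- a ≤-sorted Nodup list is <-sorted
theorem pairwise_lt_of_le_nodup (l : List String)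
    (hle : l.Pairwise (· ≤ ·)) (hnd : l.Nodup) : l.Pairwise (· < ·) :=
  (hle.and hnd).imp (fun h => lt_of_le_of_ne h.1 h.2)

-- two <-sorted lists with the same members are equal
theorem eq_of_mem_iff_pairwise_lt (l₁ l₂ : List String)
    (h₁ : l₁.Pairwise (· < ·)) (h₂ : l₂.Pairwise (· < ·))
    (hm : ∀ x, x ∈ l₁ ↔ x ∈ l₂) : l₁ = l₂ := by
  have nd₁ : l₁.Nodup := h₁.imp (fun h => ne_of_lt h)
  have nd₂ : l₂.Nodup := h₂.imp (fun h => ne_of_lt h)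
  exact List.Perm.eq_of_pairwise (fun a b _ _ h1 h2 => absurd h2 (not_lt_of_gt h1)) h₁ h₂
    ((List.perm_ext_iff_of_nodup nd₁ nd₂).2 hm)

-- ===== VERDICT (by name: the statement is the Claim_ definition above) =====
theorem makeAminoAcidLabels_spec : Claim_equal_makeAminoAcidLabels := by
  intro geneList _
  unfold Spec_makeAminoAcidLabels makeAminoAcidLabels makeAminoAcidLabels_alt
  simp only []
  set flat := geneList.flatMap (fun proteinList => proteinList.flatMap (fun protein => protein)) with hflat
  rw [totalA_eq, ← hflat]
  unfold aminoAcidDictionary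
  obtain ⟨hkm, hknd⟩ := aaLoop_keys flat PySem.Dict.empty (fun k => (flat.count k : Int))
    (by simp [PySem.Dict.keys_empty])
  set keysA := (flat.foldl (fun d key => if d.contains key then d else d.insert key ((flat.count key : Int))) PySem.Dict.empty).keys with hk
  have hAmem : ∀ x, x ∈ PySem.List.sorted keysA (fun x => x) false ↔ x ∈ flat := by
    intro x
    rw [PySem.List.mem_sorted, hkm x]
    simp [PySem.Dict.keys_empty]
  have hAle : (PySem.List.sorted keysA (fun x => x) false).Pairwise (· ≤ ·) := by
    have := PySem.List.sorted_pairwise keysA (fun x => x)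
    simpa using this
  have hAnd : (PySem.List.sorted keysA (fun x => x) false).Nodup :=
    ((PySem.List.sorted_perm keysA (fun x => x) false).nodup_iff).2 hknd
  have hApw := pairwise_lt_of_le_nodup _ hAle hAnd
  have hBle : (PySem.List.sorted flat (fun x => x) false).Pairwise (· ≤ ·) := by
    have := PySem.List.sorted_pairwise flat (fun x => x)
    simpa using this
  cases hsf : PySem.List.sorted flat (fun x => x) false with
  | nil =>
    have hfe : flat = [] := (PySem.List.sorted_eq_nil_iff flat (fun x => x) false).1 hsf
    have hkeys : keysA = [] := List.eq_nil_iff_forall_not_mem.2 (fun x hx => by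
      have := (hkm x).1 hx
      simp [PySem.Dict.keys_empty, hfe] at this)
    rw [hkeys]
    simp [PySem.List.sorted]
  | cons m t =>
    have hms : (m :: t).Pairwise (· ≤ ·) := hsf ▸ hBle
    obtain ⟨hBmem', hBpw⟩ := dd_spec t m hms
    have hstep : (m :: t).foldl (fun labels aa =>
        if labels = [] ∨ labels.getLast? ≠ some aa then labels ++ [aa] else labels) []
        = m :: dd m t := by
      rw [List.foldl_cons, if_pos (Or.inl rfl), List.nil_append]
      exact foldl_dedup_eq_dd t [m] m (by simp)
    rw [hstep]
    apply eq_of_mem_iff_pairwise_lt _ _ hApw hBpw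
    intro x
    rw [hAmem x]
    have hmt : ∀ y, y ∈ m :: t ↔ y ∈ flat := fun y => by
      rw [← hsf, PySem.List.mem_sorted]
    rw [hBmem' x, hmt x]
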